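-- pv_equiv track=rewrite | github.com/cms-sw/cmssw | FWCore/Concurrency/scripts/edmStreamStallGrapher.py | mergeContiguousBlocks
-- ===== SOURCE A (Python) =====
-- def mergeContiguousBlocks(blocks):
--     oldBlocks = blocks
--
--     blocks = []
--     if not oldBlocks:
--         return blocks
--
--     lastStartTime,lastTimeLength,lastHeight = oldBlocks[0]
--     for start,length,height in oldBlocks[1:]:
--         if height == lastHeight and lastStartTime+lastTimeLength == start:
--             lastTimeLength += length
--         else:
--             blocks.append((lastStartTime,lastTimeLength,lastHeight))
--             lastStartTime = start
--             lastTimeLength = length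
--             lastHeight = height
--     blocks.append((lastStartTime,lastTimeLength,lastHeight))
--
--     return blocks
-- ===== SOURCE B (Python) =====
-- def mergeContiguousBlocks(blocks):
--     # Build the merged list back-to-front: walk the blocks in reverse and
--     # either extend the most recently formed group (same height, times
--     # contiguous) or start a new group.  No running
--     # lastStartTime/lastTimeLength/lastHeight accumulator: the most recent
--     # group itself carries the data compared against, and since a group keeps
--     # the start and height of its first raw block, the comparison is a plain
--     # raw-neighbour check.
--     out = []
--     for start, length, height in reversed(blocks):
--         if out and out[-1][2] == height and start + length == out[-1][0]:
--             out[-1] = (start, length + out[-1][1], height)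
--         else:
--             out.append((start, length, height))
--     return out[::-1]
-- ===== Notes on version B (the rewrite author's own statement) =====
-- stated objective: alternative
-- what changed: Replaces A's forward scan with running lastStartTime/lastTimeLength/lastHeight accumulator state by a back-to-front build that merges each raw block into the head of the already-merged suffix, using only neighbour comparisons against that head.
import Mathlib
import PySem

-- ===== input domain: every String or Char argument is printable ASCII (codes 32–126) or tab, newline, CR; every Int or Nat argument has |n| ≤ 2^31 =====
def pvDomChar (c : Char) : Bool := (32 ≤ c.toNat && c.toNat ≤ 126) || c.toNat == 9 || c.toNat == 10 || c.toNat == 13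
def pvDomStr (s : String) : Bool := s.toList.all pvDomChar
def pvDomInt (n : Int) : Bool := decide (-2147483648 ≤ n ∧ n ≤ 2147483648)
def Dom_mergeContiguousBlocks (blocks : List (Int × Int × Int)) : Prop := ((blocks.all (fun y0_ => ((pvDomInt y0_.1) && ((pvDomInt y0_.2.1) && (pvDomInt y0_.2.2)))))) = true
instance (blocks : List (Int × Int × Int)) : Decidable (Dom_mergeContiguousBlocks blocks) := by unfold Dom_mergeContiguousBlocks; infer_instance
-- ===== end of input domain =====

-- B builds the merged list back-to-front by neighbour comparison with the head group,
-- instead of A's forward scan with running lastStartTime/lastTimeLength/lastHeight state (objective: alternative).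

-- ===== PORT A =====
-- loop body of A: state is (blocks, lastStartTime, lastTimeLength, lastHeight)
def mcbAStep (acc : List (Int × Int × Int) × Int × Int × Int) (b : Int × Int × Int) :
    List (Int × Int × Int) × Int × Int × Int :=
  if b.2.2 == acc.2.2.2 && acc.2.1 + acc.2.2.1 == b.1 then
    (acc.1, acc.2.1, acc.2.2.1 + b.2.1, acc.2.2.2)
  else
    (acc.1 ++ [(acc.2.1, acc.2.2.1, acc.2.2.2)], b.1, b.2.1, b.2.2)

def mergeContiguousBlocks (blocks : List (Int × Int × Int)) : List (Int × Int × Int) :=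
  match blocks with
  | [] => []
  | b0 :: rest =>
    let fin := rest.foldl mcbAStep ([], b0.1, b0.2.1, b0.2.2)
    fin.1 ++ [(fin.2.1, fin.2.2.1, fin.2.2.2)]

-- ===== PORT B =====
-- loop body of B: `out` in Python order; out[-1] = getLast?, out[-1] assignment = dropLast ++ [·]
def mcbBStep (out : List (Int × Int × Int)) (b : Int × Int × Int) : List (Int × Int × Int) :=
  match out.getLast? with
  | some p =>
    if p.2.2 == b.2.2 && b.1 + b.2.1 == p.1 then
      out.dropLast ++ [(b.1, b.2.1 + p.2.1, b.2.2)]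
    else
      out ++ [b]
  | none => [b]

def mergeContiguousBlocks_alt (blocks : List (Int × Int × Int)) : List (Int × Int × Int) :=
  (blocks.reverse.foldl mcbBStep []).reverse

-- ===== PRECONDITION & SPEC =====
def Spec_mergeContiguousBlocks (blocks : List (Int × Int × Int)) (out : List (Int × Int × Int)) : Prop := out = mergeContiguousBlocks_alt blocks
instance (blocks : List (Int × Int × Int)) (out : List (Int × Int × Int)) : Decidable (Spec_mergeContiguousBlocks blocks out) := by unfold Spec_mergeContiguousBlocks; infer_instance

-- ===== CLAIM (what is proved, stated in full; the proofs are below) =====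
def Claim_equal_mergeContiguousBlocks : Prop := ∀ (blocks : List (Int × Int × Int)), Dom_mergeContiguousBlocks blocks → Spec_mergeContiguousBlocks blocks (mergeContiguousBlocks blocks)

-- ===== LEMMAS AND PROOFS =====

-- cons-oriented form of B's merge step: prepend b to the merged list m
def mcbStep (b : Int × Int × Int) (m : List (Int × Int × Int)) : List (Int × Int × Int) :=
  match m with
  | [] => [b]
  | p :: rest =>
    if p.2.2 == b.2.2 && b.1 + b.2.1 == p.1 then (b.1, b.2.1 + p.2.1, b.2.2) :: rest
    else b :: p :: rest

theorem mcbBStep_rev (m : List (Int × Int × Int)) (b : Int × Int × Int) :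
    mcbBStep m.reverse b = (mcbStep b m).reverse := by
  cases m with
  | nil => simp [mcbBStep, mcbStep]
  | cons p rest =>
    obtain ⟨s2, l2, h2⟩ := p
    simp only [mcbStep, mcbBStep, List.reverse_cons, List.getLast?_concat, List.dropLast_concat]
    split_ifs with hc <;> simp

theorem alt_eq_foldr (blocks : List (Int × Int × Int)) :
    mergeContiguousBlocks_alt blocks = blocks.foldr mcbStep [] := by
  unfold mergeContiguousBlocks_alt
  rw [List.foldl_reverse]
  have aux : ∀ l : List (Int × Int × Int),
      l.foldr (fun x y => mcbBStep y x) [] = (l.foldr mcbStep []).reverse := by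
    intro l
    induction l with
    | nil => rfl
    | cons b t ih =>
      simp only [List.foldr_cons, ih, mcbBStep_rev]
  rw [aux, List.reverse_reverse]

-- head of `mcbStep b m` always keeps b's start and height
theorem mcbStep_head (b : Int × Int × Int) (m : List (Int × Int × Int)) :
    ∃ L rest, mcbStep b m = (b.1, L, b.2.2) :: rest := by
  cases m with
  | nil => exact ⟨b.2.1, [], rfl⟩
  | cons p rest =>
    by_cases hc : p.2.2 == b.2.2 && b.1 + b.2.1 == p.1
    · exact ⟨b.2.1 + p.2.1, rest, by simp [mcbStep, hc]⟩
    · exact ⟨b.2.1, p :: rest, by simp [mcbStep, hc]⟩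

theorem merge_assoc (ls ll lh s l h : Int) (M : List (Int × Int × Int))
    (hh : h = lh) (hs : ls + ll = s) :
    mcbStep (ls, ll, lh) (mcbStep (s, l, h) M) = mcbStep (ls, ll + l, lh) M := by
  subst hh hs
  cases M with
  | nil => simp [mcbStep]
  | cons q rest =>
    obtain ⟨s2, l2, h2⟩ := q
    by_cases hc : h2 = h ∧ ls + ll + l = s2
    · have h2' : ls + (ll + l) = s2 := by omega
      simp [mcbStep, hc.1, hc.2, h2', add_assoc]
    · have hc' : ¬(h2 = h ∧ ls + (ll + l) = s2) := by
        intro ⟨a, b⟩; exact hc ⟨a, by omega⟩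
      simp [mcbStep, hc, hc']

theorem merge_skip (ls ll lh s l h : Int) (M : List (Int × Int × Int))
    (hc : ¬(h = lh ∧ ls + ll = s)) :
    mcbStep (ls, ll, lh) (mcbStep (s, l, h) M) = (ls, ll, lh) :: mcbStep (s, l, h) M := by
  obtain ⟨L, rest, hrw⟩ := mcbStep_head (s, l, h) M
  rw [hrw]
  have : ¬(h = lh ∧ ls + ll = s) := hc
  simp only [mcbStep]
  rw [if_neg (by simp only [Bool.and_eq_true, beq_iff_eq]; tauto)]

theorem aloop (rest : List (Int × Int × Int)) :
    ∀ (out : List (Int × Int × Int)) (ls ll lh : Int),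
      ((rest.foldl mcbAStep (out, ls, ll, lh)).1 ++
        [((rest.foldl mcbAStep (out, ls, ll, lh)).2.1,
          (rest.foldl mcbAStep (out, ls, ll, lh)).2.2.1,
          (rest.foldl mcbAStep (out, ls, ll, lh)).2.2.2)])
        = out ++ mcbStep (ls, ll, lh) (rest.foldr mcbStep []) := by
  induction rest with
  | nil => intro out ls ll lh; simp [mcbStep]
  | cons b t ih =>
    intro out ls ll lh
    obtain ⟨s, l, h⟩ := b
    simp only [List.foldl_cons, List.foldr_cons]
    by_cases hc : h = lh ∧ ls + ll = s
    · have hb : mcbAStep (out, ls, ll, lh) (s, l, h) = (out, ls, ll + l, lh) := by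
        simp [mcbAStep, hc.1, hc.2]
      rw [hb, ih, merge_assoc ls ll lh s l h _ hc.1 hc.2]
    · have hb : mcbAStep (out, ls, ll, lh) (s, l, h) = (out ++ [(ls, ll, lh)], s, l, h) := by
        have : ¬(h == lh && ls + ll == s) = true := by
          simp only [Bool.and_eq_true, beq_iff_eq]; tauto
        simp [mcbAStep, this]
      rw [hb, ih, merge_skip ls ll lh s l h _ hc, List.append_assoc]
      rfl

-- ===== VERDICT (by name: the statement is the Claim_ definition above) =====
theorem mergeContiguousBlocks_spec : Claim_equal_mergeContiguousBlocks := by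
  intro blocks _
  unfold Spec_mergeContiguousBlocks
  rw [alt_eq_foldr]
  cases blocks with
  | nil => rfl
  | cons b0 rest =>
    obtain ⟨s0, l0, h0⟩ := b0
    show (let fin := rest.foldl mcbAStep ([], s0, l0, h0);
          fin.1 ++ [(fin.2.1, fin.2.2.1, fin.2.2.2)]) = _
    simp only [List.foldr_cons]
    rw [show (let fin := rest.foldl mcbAStep ([], s0, l0, h0);
          fin.1 ++ [(fin.2.1, fin.2.2.1, fin.2.2.2)]) =
        ((rest.foldl mcbAStep ([], s0, l0, h0)).1 ++
          [((rest.foldl mcbAStep ([], s0, l0, h0)).2.1,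
            (rest.foldl mcbAStep ([], s0, l0, h0)).2.2.1,
            (rest.foldl mcbAStep ([], s0, l0, h0)).2.2.2)]) from rfl]
    rw [aloop rest [] s0 l0 h0]
    simp
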